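-- pv_equiv track=rewrite | github.com/bgmsora/Katas | A wolf in sheep's clothing.py | warn_the_sheep
-- ===== SOURCE A (Python) =====
-- def warn_the_sheep(queue):
--     band=0
--     z=0
--     for x in queue:
--         if band==1:
--             z+=1
--         if x=='wolf':
--             band=1
--
--     if z!=0:
--         return 'Oi! Sheep number '+str(z)+'! You are about to be eaten by a wolf!'
--     else:
--         return 'Pls go away and stop eating my sheep'
-- ===== SOURCE B (Python) =====
-- def warn_the_sheep(queue):
--     if 'wolf' not in queue:
--         return 'Pls go away and stop eating my sheep'
--     z = len(queue) - queue.index('wolf') - 1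
--     if z != 0:
--         return 'Oi! Sheep number ' + str(z) + '! You are about to be eaten by a wolf!'
--     return 'Pls go away and stop eating my sheep'
-- ===== Notes on version B (the rewrite author's own statement) =====
-- stated objective: idiomatic
-- what changed: Replaces the flag/accumulator scan with a direct computation: find the first 'wolf' with list.index and compute the warning position arithmetically from the length.
import Mathlib
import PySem

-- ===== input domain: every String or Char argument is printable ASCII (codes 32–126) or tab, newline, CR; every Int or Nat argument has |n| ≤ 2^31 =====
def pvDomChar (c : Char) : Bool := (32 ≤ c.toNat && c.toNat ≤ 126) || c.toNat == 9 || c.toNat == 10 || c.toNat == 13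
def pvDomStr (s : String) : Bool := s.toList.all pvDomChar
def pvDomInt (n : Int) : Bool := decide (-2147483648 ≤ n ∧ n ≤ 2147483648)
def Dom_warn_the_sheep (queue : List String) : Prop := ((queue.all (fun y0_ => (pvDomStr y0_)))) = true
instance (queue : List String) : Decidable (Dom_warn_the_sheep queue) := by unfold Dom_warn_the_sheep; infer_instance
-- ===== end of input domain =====

-- B computes the warning position directly from the first index of "wolf" instead of A's flag/accumulator scan; objective: idiomatic.


-- ===== PORT A =====
-- one fold step of A's loop: z is bumped using the OLD band, then band is set
def wtsStep (s : Int × Int) (x : String) : Int × Int :=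
  (if x == "wolf" then 1 else s.1, if s.1 == 1 then s.2 + 1 else s.2)

def warn_the_sheep (queue : List String) : String :=
  let p := queue.foldl wtsStep (0, 0)
  if p.2 ≠ 0 then
    "Oi! Sheep number " ++ PySem.Int.toStr p.2 ++ "! You are about to be eaten by a wolf!"
  else
    "Pls go away and stop eating my sheep"

-- ===== PORT B =====
def warn_the_sheep_alt (queue : List String) : String :=
  match PySem.List.index? queue "wolf" with
  | none => "Pls go away and stop eating my sheep"
  | some i =>
    let z : Int := (queue.length : Int) - (i : Int) - 1
    if z ≠ 0 then
      "Oi! Sheep number " ++ PySem.Int.toStr z ++ "! You are about to be eaten by a wolf!"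
    else
      "Pls go away and stop eating my sheep"

-- ===== PRECONDITION & SPEC =====
def Spec_warn_the_sheep (queue : List String) (out : String) : Prop := out = warn_the_sheep_alt queue
instance (queue : List String) (out : String) : Decidable (Spec_warn_the_sheep queue out) := by unfold Spec_warn_the_sheep; infer_instance

-- ===== CLAIM (what is proved, stated in full; the proofs are below) =====
def Claim_equal_warn_the_sheep : Prop := ∀ (queue : List String), Dom_warn_the_sheep queue → Spec_warn_the_sheep queue (warn_the_sheep queue)

-- ===== LEMMAS AND PROOFS =====

-- once band = 1, every remaining element bumps z
theorem wts_fold_band_one (l : List String) (z0 : Int) :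
    l.foldl wtsStep (1, z0) = (1, z0 + l.length) := by
  induction l generalizing z0 with
  | nil => simp
  | cons h t ih =>
    simp only [List.foldl_cons, wtsStep]
    split <;> (simp [ih]; omega)

-- the fold result in terms of the first index of "wolf"
theorem wts_fold_char (l : List String) :
    l.foldl wtsStep (0, 0) =
      (match PySem.List.index? l "wolf" with
       | none => ((0 : Int), (0 : Int))
       | some i => (1, ((l.length - i - 1 : Nat) : Int))) := by
  induction l with
  | nil => simp [PySem.List.index?]
  | cons h t ih =>
    by_cases hw : h = "wolf"
    · subst hw
      rw [PySem.List.index?_cons_self]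
      simp only [List.foldl_cons, wtsStep]
      norm_num [wts_fold_band_one]
    · rw [PySem.List.index?_cons_of_ne t hw]
      simp only [List.foldl_cons]
      have hstep : wtsStep (0, 0) h = (0, 0) := by
        simp [wtsStep, hw]
      rw [hstep, ih]
      cases hidx : PySem.List.index? t "wolf" with
      | none => simp
      | some i =>
        simp

-- ===== VERDICT (by name: the statement is the Claim_ definition above) =====
theorem warn_the_sheep_spec : Claim_equal_warn_the_sheep := by
  intro queue _
  unfold Spec_warn_the_sheep warn_the_sheep warn_the_sheep_alt
  rw [wts_fold_char]
  cases hidx : PySem.List.index? queue "wolf" with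
  | none => simp
  | some i =>
    obtain ⟨hk, -, -⟩ := PySem.List.getElem_of_index?_eq_some hidx
    have hz : ((queue.length - i - 1 : Nat) : Int) = (queue.length : Int) - (i : Int) - 1 := by
      push_cast [Nat.cast_sub (by omega : 1 ≤ queue.length - i), Nat.cast_sub (by omega : i ≤ queue.length)]
      ring
    simp only [hz]
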